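-- pv_equiv track=rewrite | github.com/talkdkg/toolkit | problems/subsegment/subsegment.py | maxCountInArrays
-- ===== SOURCE A (Python) =====
-- def maxCountInArrays(keywordArr, segmentArr):
--    num = 0
--    for i in range(0, len(keywordArr)-1):
--       cnt = 0
--       for j in range(0, len(segmentArr)-1):
--          if keywordArr[i] == segmentArr[j]:
--             cnt += 1
--       if cnt > num:
--          num = cnt
--    return num
-- ===== SOURCE B (Python) =====
-- def maxCountInArrays(keywordArr, segmentArr):
--     counts = {}
--     for v in segmentArr[:-1]:
--         counts[v] = counts.get(v, 0) + 1
--     keywords = set(keywordArr[:-1])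
--     return max((c for v, c in counts.items() if v in keywords), default=0)
-- ===== Notes on version B (the rewrite author's own statement) =====
-- stated objective: faster
-- what changed: Replaces the nested per-keyword rescans of the segment array with one counting pass over segmentArr[:-1] building a dict, a set of keywordArr[:-1], and a single max over the distinct counted values that are keywords (default 0).
import Mathlib
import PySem

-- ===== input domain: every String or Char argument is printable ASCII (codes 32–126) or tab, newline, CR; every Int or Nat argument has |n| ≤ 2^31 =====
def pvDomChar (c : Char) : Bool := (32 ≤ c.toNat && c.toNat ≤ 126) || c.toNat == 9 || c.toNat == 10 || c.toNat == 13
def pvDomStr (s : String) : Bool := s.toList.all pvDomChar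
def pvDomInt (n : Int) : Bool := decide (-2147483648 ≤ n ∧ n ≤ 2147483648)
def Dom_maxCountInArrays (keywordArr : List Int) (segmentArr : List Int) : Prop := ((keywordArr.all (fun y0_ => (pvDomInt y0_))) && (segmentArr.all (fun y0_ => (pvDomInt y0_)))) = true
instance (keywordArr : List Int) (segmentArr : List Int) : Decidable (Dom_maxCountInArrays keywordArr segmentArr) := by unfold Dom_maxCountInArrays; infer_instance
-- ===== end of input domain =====

-- B replaces A's nested per-keyword rescans of the segment array by one counting
-- pass (a dict) plus a single max over the distinct counted values that are keywords.


-- ===== PORT A =====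
def maxCountInArrays (keywordArr : List Int) (segmentArr : List Int) : Int :=
  (PySem.List.pyRange 0 ((keywordArr.length : Int) - 1) 1).foldl
    (fun num i =>
      let cnt : Int :=
        (PySem.List.pyRange 0 ((segmentArr.length : Int) - 1) 1).foldl
          (fun cnt j =>
            if PySem.List.pyGetD keywordArr i 0 == PySem.List.pyGetD segmentArr j 0
            then cnt + 1 else cnt) 0
      if cnt > num then cnt else num) 0

-- ===== PORT B =====
def maxCountInArrays_alt (keywordArr : List Int) (segmentArr : List Int) : Int :=
  let counts : PySem.Dict Int Int :=
    (PySem.List.slice segmentArr none (some (-1))).foldl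
      (fun d v => d.insert v (d.getD v 0 + 1)) PySem.Dict.empty
  let keywords : PySem.Set Int :=
    PySem.Set.ofList (PySem.List.slice keywordArr none (some (-1)))
  PySem.List.maxD
    ((counts.items.filter (fun p => PySem.Set.contains keywords p.1)).map (fun p => p.2))
    (fun c => c) 0

-- ===== PRECONDITION & SPEC =====
def Spec_maxCountInArrays (keywordArr : List Int) (segmentArr : List Int) (out : Int) : Prop := out = maxCountInArrays_alt keywordArr segmentArr
instance (keywordArr : List Int) (segmentArr : List Int) (out : Int) : Decidable (Spec_maxCountInArrays keywordArr segmentArr out) := by unfold Spec_maxCountInArrays; infer_instance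

-- ===== CLAIM (what is proved, stated in full; the proofs are below) =====
def Claim_equal_maxCountInArrays : Prop := ∀ (keywordArr : List Int) (segmentArr : List Int), Dom_maxCountInArrays keywordArr segmentArr → Spec_maxCountInArrays keywordArr segmentArr (maxCountInArrays keywordArr segmentArr)

-- ===== LEMMAS AND PROOFS =====

-- a loop 'for i in range(0, len(xs)-1): … xs[i] …' is a fold over xs.dropLast
theorem pv_fold_dropLast {β : Type} (xs : List Int) (f : β → Int → β) (init : β) :
    (PySem.List.pyRange 0 ((xs.length : Int) - 1) 1).foldl
      (fun acc i => f acc (PySem.List.pyGetD xs i 0)) init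
    = xs.dropLast.foldl f init := by
  rcases eq_or_ne xs [] with h | h
  · subst h
    rw [PySem.List.pyRange_one_eq_nil (by norm_num)]
    rfl
  · have hpos : 0 < xs.length := List.length_pos_of_ne_nil h
    have hlen : (xs.length : Int) - 1 = (xs.dropLast.length : Int) := by
      have := xs.length_dropLast
      omega
    rw [hlen,
      PySem.List.foldl_congr_mem _ _
        (fun acc i => f acc (PySem.List.pyGetD xs.dropLast i 0)) init
        (by
          intro acc i hi
          show f acc (PySem.List.pyGetD xs i 0) = f acc (PySem.List.pyGetD xs.dropLast i 0)
          rw [PySem.List.mem_pyRange_one] at hi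
          have h1 : i < (xs.dropLast.length : Int) := hi.2
          have h2 : i < (xs.length : Int) := by
            have := xs.length_dropLast; omega
          rw [PySem.List.pyGetD_eq_getElem xs 0 hi.1 h2,
            PySem.List.pyGetD_eq_getElem xs.dropLast 0 hi.1 h1,
            List.getElem_dropLast])]
    exact PySem.List.foldl_pyRange_zero_pyGetD' xs.dropLast 0 f init

-- upper bound for a running max of a projection
theorem pv_foldl_max_le {α : Type} (l : List α) (f : α → Int) (init c : Int)
    (h0 : init ≤ c) (h : ∀ x ∈ l, f x ≤ c) :
    l.foldl (fun n x => max n (f x)) init ≤ c := by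
  induction l generalizing init with
  | nil => exact h0
  | cons y t ih =>
    exact ih (max init (f y)) (max_le h0 (h y (List.mem_cons.mpr (Or.inl rfl))))
      (fun x hx => h x (List.mem_cons.mpr (Or.inr hx)))

-- A's value is a running max of segment-prefix counts over the keyword prefix
theorem pv_A_eq (keywordArr segmentArr : List Int) :
    maxCountInArrays keywordArr segmentArr
    = keywordArr.dropLast.foldl
        (fun n kv => max n ((segmentArr.dropLast.count kv : Nat) : Int)) 0 := by
  unfold maxCountInArrays
  rw [pv_fold_dropLast keywordArr
    (fun num kv =>
      let cnt : Int :=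
        (PySem.List.pyRange 0 ((segmentArr.length : Int) - 1) 1).foldl
          (fun cnt j => if kv == PySem.List.pyGetD segmentArr j 0 then cnt + 1 else cnt) 0
      if cnt > num then cnt else num) 0]
  rw [PySem.List.foldl_congr_mem _ _
    (fun n kv => max n ((segmentArr.dropLast.count kv : Nat) : Int)) 0
    (fun num kv _ => ?_)]
  show (if ((PySem.List.pyRange 0 ((segmentArr.length : Int) - 1) 1).foldl
          (fun cnt j => if kv == PySem.List.pyGetD segmentArr j 0 then cnt + 1 else cnt) 0) > num
      then ((PySem.List.pyRange 0 ((segmentArr.length : Int) - 1) 1).foldl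
          (fun cnt j => if kv == PySem.List.pyGetD segmentArr j 0 then cnt + 1 else cnt) 0)
      else num)
    = max num ((segmentArr.dropLast.count kv : Nat) : Int)
  rw [show ((PySem.List.pyRange 0 ((segmentArr.length : Int) - 1) 1).foldl
        (fun cnt j => if kv == PySem.List.pyGetD segmentArr j 0 then cnt + 1 else cnt) (0:Int))
      = segmentArr.dropLast.foldl
        (fun cnt sv => if kv == sv then cnt + 1 else cnt) (0:Int)
    from pv_fold_dropLast segmentArr (fun cnt sv => if kv == sv then cnt + 1 else cnt) 0,
    PySem.List.foldl_congr_mem _ _ (fun cnt sv => if sv == kv then cnt + 1 else cnt) 0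
      (by intro acc x _; simp only []; rw [BEq.comm]),
    PySem.List.foldl_beq_add_one, zero_add, max_def]
  split_ifs <;> omega

-- max(vals, default=0) over nonnegative vals is the running max from 0
theorem pv_maxD_nonneg (l : List Int) (h : ∀ v ∈ l, 0 ≤ v) :
    PySem.List.maxD l (fun c => c) 0 = l.foldl max 0 := by
  cases l with
  | nil => rfl
  | cons x t =>
    rw [PySem.List.maxD, PySem.List.max?_id_cons, Option.getD_some, List.foldl_cons,
      max_eq_right (h x (List.mem_cons.mpr (Or.inl rfl)))]

-- B's value is a running max of the same counts over the filtered distinct segment values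
theorem pv_B_eq (keywordArr segmentArr : List Int) :
    maxCountInArrays_alt keywordArr segmentArr
    = ((PySem.Set.ofList segmentArr.dropLast).filter
        (fun k => PySem.Set.contains (PySem.Set.ofList keywordArr.dropLast) k)).foldl
        (fun n k => max n ((segmentArr.dropLast.count k : Nat) : Int)) 0 := by
  unfold maxCountInArrays_alt
  simp only [PySem.List.slice_to_neg_one, PySem.Dict.foldl_insert_getD_add_one_eq_counter,
    PySem.Dict.items_counter, List.filter_map, List.map_map, Function.comp_def]
  rw [pv_maxD_nonneg _ (by
    intro v hv
    simp only [List.mem_map] at hv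
    obtain ⟨k, _, hk⟩ := hv
    omega), List.foldl_map]

theorem pv_main (keywordArr segmentArr : List Int) :
    maxCountInArrays keywordArr segmentArr = maxCountInArrays_alt keywordArr segmentArr := by
  rw [pv_A_eq, pv_B_eq]
  set K := keywordArr.dropLast
  set S := segmentArr.dropLast
  set L := (PySem.Set.ofList S).filter
      (fun k => PySem.Set.contains (PySem.Set.ofList K) k) with hLdef
  have hmemL : ∀ k, k ∈ L ↔ k ∈ S ∧ k ∈ K := by
    intro k
    rw [hLdef, List.mem_filter, PySem.Set.mem_ofList]
    constructor
    · rintro ⟨hs, hc⟩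
      refine ⟨hs, ?_⟩
      have : k ∈ PySem.Set.ofList K := by
        simpa [PySem.Set.contains] using hc
      rwa [PySem.Set.mem_ofList] at this
    · rintro ⟨hs, hk⟩
      refine ⟨hs, ?_⟩
      simp [PySem.Set.contains, PySem.Set.mem_ofList, hk]
  apply le_antisymm
  · apply pv_foldl_max_le
    · exact (PySem.List.le_foldl_max_int L (fun k => ((S.count k : Nat) : Int)) 0).1
    · intro kv hkv
      by_cases hs : kv ∈ S
      · exact (PySem.List.le_foldl_max_int L (fun k => ((S.count k : Nat) : Int)) 0).2
          kv ((hmemL kv).2 ⟨hs, hkv⟩)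
      · have : S.count kv = 0 := List.count_eq_zero.2 hs
        rw [this]
        exact le_trans (by norm_num)
          (PySem.List.le_foldl_max_int L (fun k => ((S.count k : Nat) : Int)) 0).1
  · apply pv_foldl_max_le
    · exact (PySem.List.le_foldl_max_int K (fun k => ((S.count k : Nat) : Int)) 0).1
    · intro k hk
      exact (PySem.List.le_foldl_max_int K (fun k => ((S.count k : Nat) : Int)) 0).2
        k ((hmemL k).1 hk).2

-- ===== VERDICT (by name: the statement is the Claim_ definition above) =====
theorem maxCountInArrays_spec : Claim_equal_maxCountInArrays := by
  intro keywordArr segmentArr _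
  unfold Spec_maxCountInArrays
  exact pv_main keywordArr segmentArr
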